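-- pv_equiv track=rewrite | github.com/czaky/puzzles | search.py | largest_sum_cycle
-- ===== SOURCE A (Python) =====
-- def largest_sum_cycle(edges: list[int]) -> int:
--     """Return the max node index sum of cycles in graph defined by `edges`."""
--     # Simplest recursive solution in `O(|E|)`.
--     # For each cycle we compute the total path sum reached so far.
--     # This allows us to remove any tangling prefix nodes from the sum.
--     # At the same time the `edges` are marked as dead-end.
--     # This allows the code to run in `O(|E|)`
--
--     # Contains the sums of the paths.
--     v = [-1] * len(edges)
--
--     def visit(i: int, s: int) -> int:
--         if edges[i] < 0:
--             return -1
--         s += i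
--         if v[i] >= 0:
--             # Remove any prefix from the sum.
--             return s - v[i]
--         # Mark the cell with the sum so far.
--         v[i] = s
--         result = visit(edges[i], s)
--         # Mark the cell as dead-end to prevent revisits.
--         edges[i] = -1
--         return result
--
--     return max(visit(i, 0) for i in range(len(edges)))
-- ===== SOURCE B (Python) =====
-- def largest_sum_cycle(edges: list[int]) -> int:
--     """Return the max node index sum of cycles in graph defined by `edges`."""
--     # Iterative chain-walk instead of recursion: same global sum array `v`,
--     # but each start follows successors in a while loop, then marks the
--     # walked nodes as dead-ends.  (Mutates `edges` in place, like the original.)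
--     n = len(edges)
--     v = [-1] * n
--     results = []
--     for i in range(n):
--         s = 0
--         node = i
--         walked = []
--         while edges[node] >= 0 and v[node] < 0:
--             s += node
--             v[node] = s
--             walked.append(node)
--             node = edges[node]
--         if edges[node] < 0:
--             res = -1
--         else:
--             res = s + node - v[node]
--         for nd in walked:
--             edges[nd] = -1
--         results.append(res)
--     return max(results)
-- ===== Notes on version B (the rewrite author's own statement) =====
-- stated objective: alternative
-- what changed: The recursive visit (marking edges on unwind) is replaced by an explicit iterative while-loop chain walk per start node that records the walked nodes and marks them dead-end after the walk, with the max taken over a results list instead of a generator.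
import Mathlib
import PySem

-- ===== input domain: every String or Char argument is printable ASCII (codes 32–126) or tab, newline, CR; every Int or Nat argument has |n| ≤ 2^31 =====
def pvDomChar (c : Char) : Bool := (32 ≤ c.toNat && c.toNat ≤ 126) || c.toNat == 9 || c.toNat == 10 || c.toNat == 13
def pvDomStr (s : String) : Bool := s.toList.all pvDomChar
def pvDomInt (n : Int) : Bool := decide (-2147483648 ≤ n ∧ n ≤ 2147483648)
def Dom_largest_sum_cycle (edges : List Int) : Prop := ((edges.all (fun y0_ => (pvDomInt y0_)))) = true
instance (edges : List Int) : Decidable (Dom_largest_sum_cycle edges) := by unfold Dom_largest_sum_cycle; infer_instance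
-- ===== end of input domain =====

-- B changes the decomposition (iterative chain walk instead of recursion), same cost; the
-- equivalence proved is about the return value (both Pythons mutate `edges` identically).

-- ===== PORT A =====
-- recursive visit, threading the mutable state (edges, v); fuel n+1 bounds the recursion
-- depth (each recursive step sets a fresh v-cell to a nonnegative sum, so depth ≤ n+1).
def pyVisit : Nat → List Int → List Int → Int → Int → (Int × List Int × List Int)
  | 0, edges, v, _, _ => (-1, edges, v)      -- fuel exhausted: unreachable inside Pre_
  | fuel+1, edges, v, i, s =>
    match PySem.List.pyGet? edges i with
    | none => (-1, edges, v)                 -- IndexError: excluded by Pre_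
    | some ei =>
      if ei < 0 then (-1, edges, v)
      else
        let s' := s + i
        match PySem.List.pyGet? v i with
        | none => (-1, edges, v)             -- unreachable: v has edges' length
        | some vi =>
          if 0 ≤ vi then (s' - vi, edges, v)
          else
            let v1 := v.set i.toNat s'
            let r := pyVisit fuel edges v1 ei s'
            (r.1, r.2.1.set i.toNat (-1), r.2.2)

def largest_sum_cycle (edges : List Int) : Int :=
  let n := edges.length
  let v := List.replicate n (-1 : Int)
  let st := (PySem.List.pyRange 0 (n : Int) 1).foldl
    (fun (st : List Int × List Int × List Int) (i : Int) =>
      let r := pyVisit (n+1) st.1 st.2.1 i 0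
      (r.2.1, r.2.2, st.2.2 ++ [r.1]))
    (edges, v, [])
  (PySem.List.max? st.2.2 (fun y => y)).getD (-1)

-- ===== PORT B =====
-- iterative walk: follow successors while edges[node] ≥ 0 and v[node] < 0,
-- collecting the walked nodes; afterwards mark them dead-end in walk order.
def walkLoop : Nat → List Int → List Int → Int → Int → List Int → (Int × List Int × List Int)
  | 0, _, v, _, _, walked => (-1, v, walked)
  | fuel+1, edges, v, node, s, walked =>
    match PySem.List.pyGet? edges node, PySem.List.pyGet? v node with
    | some en, some vn =>
      if 0 ≤ en ∧ vn < 0 then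
        let s' := s + node
        walkLoop fuel edges (v.set node.toNat s') en s' (walked ++ [node])
      else
        (if en < 0 then -1 else s + node - vn, v, walked)
    | _, _ => (-1, v, walked)

def markAll (edges : List Int) (walked : List Int) : List Int :=
  walked.foldl (fun e nd => e.set nd.toNat (-1)) edges

def largest_sum_cycle_alt (edges : List Int) : Int :=
  let n := edges.length
  let v := List.replicate n (-1 : Int)
  let st := (PySem.List.pyRange 0 (n : Int) 1).foldl
    (fun (st : List Int × List Int × List Int) (i : Int) =>
      let r := walkLoop (n+1) st.1 st.2.1 i 0 []
      (markAll st.1 r.2.2, r.2.1, st.2.2 ++ [r.1]))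
    (edges, v, [])
  (PySem.List.max? st.2.2 (fun y => y)).getD (-1)

-- ===== PRECONDITION & SPEC =====
-- Pre_ excludes exactly the inputs where Python A raises: the empty list (ValueError from
-- max of an empty generator) and any successor index ≥ len(edges) (IndexError when followed).
def Pre_largest_sum_cycle (edges : List Int) : Prop :=
  edges ≠ [] ∧ ∀ e ∈ edges, e < (edges.length : Int)
instance (edges : List Int) : Decidable (Pre_largest_sum_cycle edges) := by
  unfold Pre_largest_sum_cycle; infer_instance
def pvWitness_largest_sum_cycle : List Int := [1, 2, 0, -1]

def Spec_largest_sum_cycle (edges : List Int) (out : Int) : Prop := out = largest_sum_cycle_alt edges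
instance (edges : List Int) (out : Int) : Decidable (Spec_largest_sum_cycle edges out) := by unfold Spec_largest_sum_cycle; infer_instance

-- ===== CLAIM (what is proved, stated in full; the proofs are below) =====
def Claim_equal_largest_sum_cycle : Prop := ∀ (edges : List Int), Dom_largest_sum_cycle edges → Pre_largest_sum_cycle edges → Spec_largest_sum_cycle edges (largest_sum_cycle edges)

-- ===== LEMMAS AND PROOFS =====

-- marking commutes with a single set to -1 (all marks write the same value -1)
theorem markAll_set_comm (w : List Int) (e : List Int) (x : Int) :
    markAll (e.set x.toNat (-1)) w = (markAll e w).set x.toNat (-1) := by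
  induction w generalizing e with
  | nil => rfl
  | cons nd t ih =>
    simp only [markAll, List.foldl_cons] at *
    by_cases h : x.toNat = nd.toNat
    · have h1 : (e.set x.toNat (-1)).set nd.toNat (-1) = e.set nd.toNat (-1) := by
        rw [h, List.set_set]
      have h2 : (e.set nd.toNat (-1)).set x.toNat (-1) = e.set nd.toNat (-1) := by
        rw [h, List.set_set]
      rw [h1, ← ih (e.set nd.toNat (-1)), h2]
    · rw [List.set_comm _ _ h, ih]

theorem markAll_length (e w : List Int) : (markAll e w).length = e.length := by
  induction w generalizing e with
  | nil => rfl
  | cons nd t ih => simp [markAll, List.foldl_cons] at *; rw [ih]; simp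

-- accumulator lemma for the walked list
theorem walkLoop_acc (fuel : Nat) :
    ∀ (edges v : List Int) (node s : Int) (w0 : List Int),
    walkLoop fuel edges v node s w0 =
      ((walkLoop fuel edges v node s []).1, (walkLoop fuel edges v node s []).2.1,
        w0 ++ (walkLoop fuel edges v node s []).2.2) := by
  induction fuel with
  | zero => intro edges v node s w0; simp [walkLoop]
  | succ fuel ih =>
    intro edges v node s w0
    simp only [walkLoop]
    cases hg : PySem.List.pyGet? edges node with
    | none => simp
    | some en =>
      cases hv : PySem.List.pyGet? v node with
      | none => simp
      | some vn =>
        simp only []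
        by_cases hc : 0 ≤ en ∧ vn < 0
        · simp only [if_pos hc]
          rw [ih edges _ en _ (w0 ++ [node]), ih edges _ en _ ([] ++ [node])]
          simp
        · simp [if_neg hc]

-- same in-range behaviour of the two state arrays when they have equal length
theorem pyGet?_none_iff_of_len {α β : Type} (xs : List α) (ys : List β) (i : Int)
    (h : ys.length = xs.length) :
    (PySem.List.pyGet? xs i = none) ↔ (PySem.List.pyGet? ys i = none) := by
  rw [PySem.List.pyGet?_eq_none_iff, PySem.List.pyGet?_eq_none_iff, h]

-- KEY LEMMA: the recursive visit equals the iterative walk followed by marking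
theorem visit_eq_walk (fuel : Nat) :
    ∀ (edges v : List Int) (i s : Int), v.length = edges.length →
    pyVisit fuel edges v i s =
      ((walkLoop fuel edges v i s []).1,
        markAll edges (walkLoop fuel edges v i s []).2.2,
        (walkLoop fuel edges v i s []).2.1) := by
  induction fuel with
  | zero => intro edges v i s _; simp [pyVisit, walkLoop, markAll]
  | succ fuel ih =>
    intro edges v i s hlen
    simp only [pyVisit, walkLoop]
    cases hg : PySem.List.pyGet? edges i with
    | none =>
      have hv : PySem.List.pyGet? v i = none := (pyGet?_none_iff_of_len edges v i hlen).1 hg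
      simp [markAll]
    | some ei =>
      cases hv : PySem.List.pyGet? v i with
      | none =>
        have h0 : PySem.List.pyGet? edges i = none :=
          (pyGet?_none_iff_of_len edges v i hlen).2 hv
        simp [hg] at h0
      | some vi =>
        simp only []
        by_cases hei : ei < 0
        · have hc : ¬ (0 ≤ ei ∧ vi < 0) := by omega
          simp [if_neg hc, hei, markAll]
        · simp only [if_neg hei]
          by_cases hvi : 0 ≤ vi
          · have hc : ¬ (0 ≤ ei ∧ vi < 0) := by omega
            simp only [if_pos hvi, if_neg hc]
            simp [markAll]
          · have hc : 0 ≤ ei ∧ vi < 0 := by omega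
            simp only [if_neg hvi, if_pos hc]
            have hlen1 : (v.set i.toNat (s + i)).length = edges.length := by
              simp [hlen]
            rw [ih edges (v.set i.toNat (s + i)) ei (s + i) hlen1]
            rw [walkLoop_acc fuel edges (v.set i.toNat (s + i)) ei (s + i) ([] ++ [i])]
            simp only [List.nil_append, List.singleton_append]
            have hm :
                markAll edges (i :: (walkLoop fuel edges (v.set i.toNat (s + i)) ei (s + i) []).2.2)
                  = (markAll edges
                      (walkLoop fuel edges (v.set i.toNat (s + i)) ei (s + i) []).2.2).set
                      i.toNat (-1) := by
              simp only [markAll, List.foldl_cons]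
              exact markAll_set_comm _ _ _
            rw [hm]

-- the outer fold: thread the two states through any index list
theorem fold_eq (n : Nat) :
    ∀ (is : List Int) (edges v rs : List Int), v.length = edges.length →
    is.foldl
      (fun (st : List Int × List Int × List Int) (i : Int) =>
        let r := pyVisit (n+1) st.1 st.2.1 i 0
        (r.2.1, r.2.2, st.2.2 ++ [r.1])) (edges, v, rs) =
    is.foldl
      (fun (st : List Int × List Int × List Int) (i : Int) =>
        let r := walkLoop (n+1) st.1 st.2.1 i 0 []
        (markAll st.1 r.2.2, r.2.1, st.2.2 ++ [r.1])) (edges, v, rs) := by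
  intro is
  induction is with
  | nil => intro edges v rs _; rfl
  | cons i t ih =>
    intro edges v rs hlen
    simp only [List.foldl_cons]
    rw [visit_eq_walk (n+1) edges v i 0 hlen]
    apply ih
    rw [markAll_length]
    -- walkLoop preserves the v-length
    have : ∀ fuel edges v node s w, ((walkLoop fuel edges v node s w).2.1).length = v.length := by
      intro fuel
      induction fuel with
      | zero => intro edges v node s w; simp [walkLoop]
      | succ fuel ih2 =>
        intro edges v node s w
        simp only [walkLoop]
        cases hg : PySem.List.pyGet? edges node with
        | none => simp
        | some en =>
          cases hv : PySem.List.pyGet? v node with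
          | none => simp
          | some vn =>
            simp only []
            by_cases hc : 0 ≤ en ∧ vn < 0
            · simp only [if_pos hc]; rw [ih2]; simp
            · simp [if_neg hc]
    rw [this, hlen]

-- ===== VERDICT (by name: the statement is the Claim_ definition above) =====
theorem largest_sum_cycle_spec : Claim_equal_largest_sum_cycle := by
  intro edges _ _
  show largest_sum_cycle edges = largest_sum_cycle_alt edges
  unfold largest_sum_cycle largest_sum_cycle_alt
  simp only []
  rw [fold_eq edges.length (PySem.List.pyRange 0 (edges.length : Int) 1) edges
        (List.replicate edges.length (-1 : Int)) [] (by simp)]
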